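-- pv_equiv track=rewrite | github.com/OxQuasar/nous-memories | iching/relations/boolean_analysis.py | verify_anf
-- ===== SOURCE A (Python) =====
-- def monomial_eval(S, x):
--     """Evaluate monomial S at point x: 1 iff (x & S) == S."""
--     return 1 if (x & S) == S else 0
--
-- def verify_anf(coeffs, f, p=5):
--     """Verify ANF reconstruction."""
--     for x in range(8):
--         val = 0
--         for S in range(8):
--             val = (val + coeffs[S] * monomial_eval(S, x)) % p
--         if val != f[x]:
--             return False
--     return True
-- ===== SOURCE B (Python) =====
-- def verify_anf(coeffs, f, p=5):
--     """Verify ANF reconstruction via the fast subset-sum (Moebius) transform."""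
--     g = [coeffs[i] for i in range(8)]
--     for i in range(3):
--         bit = 1 << i
--         for x in range(8):
--             if x & bit:
--                 g[x] = g[x] + g[x ^ bit]
--     for x in range(8):
--         if g[x] % p != f[x]:
--             return False
--     return True
-- ===== Notes on version B (the rewrite author's own statement) =====
-- stated objective: alternative
-- what changed: Replaces the per-point rescan of all 8 monomials (8x8 multiply-accumulate with a running mod) by one in-place fast subset-sum butterfly transform over the 3 bit positions followed by a single reduce-and-compare pass.
import Mathlib
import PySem

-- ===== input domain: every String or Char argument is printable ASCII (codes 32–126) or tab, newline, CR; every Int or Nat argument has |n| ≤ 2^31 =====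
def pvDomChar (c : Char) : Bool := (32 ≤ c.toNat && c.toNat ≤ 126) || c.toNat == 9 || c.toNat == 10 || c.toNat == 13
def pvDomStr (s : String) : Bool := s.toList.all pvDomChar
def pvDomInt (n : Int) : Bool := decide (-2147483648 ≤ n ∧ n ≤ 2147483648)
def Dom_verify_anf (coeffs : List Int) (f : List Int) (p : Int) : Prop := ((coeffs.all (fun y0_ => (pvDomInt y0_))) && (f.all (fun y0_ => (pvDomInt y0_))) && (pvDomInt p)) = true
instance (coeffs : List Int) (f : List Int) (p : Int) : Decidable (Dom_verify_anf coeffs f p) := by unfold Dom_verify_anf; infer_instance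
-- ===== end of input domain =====

-- B replaces A's per-point rescan of all 8 monomials by the in-place fast subset-sum (butterfly) transform; same return value on Pre_.

-- ===== PORT A =====
def monomial_eval (S x : Int) : Int := if PySem.Int.band x S == S then 1 else 0

-- inner loop of A: val = (val + coeffs[S] * monomial_eval(S, x)) % p for S in range(8)
def verifyARow (coeffs : List Int) (p x : Int) : Int :=
  (PySem.List.pyRange 0 8 1).foldl
    (fun val S => PySem.Int.mod (val + PySem.List.pyGetD coeffs S 0 * monomial_eval S x) p) 0

-- outer loop of A over x in range(8), early return False at the first mismatch
def verifyALoop (coeffs f : List Int) (p : Int) : List Int → Bool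
  | [] => true
  | x :: xs =>
    match PySem.List.pyGet? f x with
    | none => false   -- f[x] raises IndexError in Python here; Pre_ makes no claim about A's value
    | some fx => if verifyARow coeffs p x ≠ fx then false else verifyALoop coeffs f p xs

def verify_anf (coeffs : List Int) (f : List Int) (p : Int) : Bool :=
  verifyALoop coeffs f p (PySem.List.pyRange 0 8 1)

-- ===== PORT B =====
-- body of B's inner butterfly loop: if x & bit: g[x] = g[x] + g[x ^ bit]
def butterflyStep (bit : Int) (g : List Int) (x : Int) : List Int :=
  if PySem.Int.band x bit ≠ 0 then
    PySem.List.pySetD g x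
      (PySem.List.pyGetD g x 0 + PySem.List.pyGetD g (PySem.Int.bxor x bit) 0)
  else g

-- final loop of B: return False at the first x with g[x] % p != f[x]
def verifyBCheck (g f : List Int) (p : Int) : List Int → Bool
  | [] => true
  | x :: xs =>
    match PySem.List.pyGet? f x with
    | none => false   -- f[x] raises IndexError in Python here; Pre_ makes no claim about B's value
    | some fx => if PySem.Int.mod (PySem.List.pyGetD g x 0) p ≠ fx then false else verifyBCheck g f p xs

def verify_anf_alt (coeffs : List Int) (f : List Int) (p : Int) : Bool :=
  let g0 := (PySem.List.pyRange 0 8 1).map (fun i => PySem.List.pyGetD coeffs i 0)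
  let g := (PySem.List.pyRange 0 3 1).foldl
    (fun g i => (PySem.List.pyRange 0 8 1).foldl (butterflyStep ((1 : Int) <<< i.toNat)) g) g0
  verifyBCheck g f p (PySem.List.pyRange 0 8 1)

-- ===== PRECONDITION & SPEC =====
-- Pre_ excludes exactly the inputs on which A can never return: p = 0 (ZeroDivisionError) and
-- fewer than 8 coefficients (IndexError before the first comparison). A short f is admitted:
-- there A and B raise IndexError at the same point unless an earlier mismatch returns False first.
def Pre_verify_anf (coeffs : List Int) (_f : List Int) (p : Int) : Prop :=
  8 ≤ coeffs.length ∧ p ≠ 0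
instance (coeffs : List Int) (f : List Int) (p : Int) : Decidable (Pre_verify_anf coeffs f p) := by
  unfold Pre_verify_anf; infer_instance

def pvWitness_verify_anf : List Int × List Int × Int :=
  ([1, 0, 2, 0, 0, 1, 0, 3], [1, 1, 3, 3, 1, 2, 3, 1], 5)

def Spec_verify_anf (coeffs : List Int) (f : List Int) (p : Int) (out : Bool) : Prop := out = verify_anf_alt coeffs f p
instance (coeffs : List Int) (f : List Int) (p : Int) (out : Bool) : Decidable (Spec_verify_anf coeffs f p out) := by unfold Spec_verify_anf; infer_instance

-- ===== CLAIM (what is proved, stated in full; the proofs are below) =====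
def Claim_equal_verify_anf : Prop := ∀ (coeffs : List Int) (f : List Int) (p : Int), Dom_verify_anf coeffs f p → Pre_verify_anf coeffs f p → Spec_verify_anf coeffs f p (verify_anf coeffs f p)

-- ===== LEMMAS AND PROOFS =====
-- a running Python-% (= Int.fmod) commutes with later addition, up to the final %
theorem pvFmodAddLeft (a b p : Int) : (Int.fmod a p + b).fmod p = (a + b).fmod p := by
  rw [show Int.fmod a p = a - p * a.fdiv p from Int.fmod_def a p,
      show a - p * a.fdiv p + b = (a + b) + p * (-(a.fdiv p)) from by ring,
      Int.add_mul_fmod_self_left]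

theorem pvFmodFmod (a p : Int) : (Int.fmod a p).fmod p = a.fmod p := by
  have h := pvFmodAddLeft a 0 p
  rw [add_zero, add_zero] at h
  exact h

theorem pvFmodCongr (a b p : Int) (h : a = b) : Int.fmod a p = Int.fmod b p := by rw [h]

-- numeral-index instances of the PySem bridge lemmas (the @[simp] forms match casts, not numerals)
theorem pvGetD0 {α : Type} (xs : List α) (d : α) : PySem.List.pyGetD xs (0:Int) d = xs.getD 0 d := PySem.List.pyGetD_natCast xs 0 d
theorem pvGetD1 {α : Type} (xs : List α) (d : α) : PySem.List.pyGetD xs (1:Int) d = xs.getD 1 d := PySem.List.pyGetD_natCast xs 1 d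
theorem pvGetD2 {α : Type} (xs : List α) (d : α) : PySem.List.pyGetD xs (2:Int) d = xs.getD 2 d := PySem.List.pyGetD_natCast xs 2 d
theorem pvGetD3 {α : Type} (xs : List α) (d : α) : PySem.List.pyGetD xs (3:Int) d = xs.getD 3 d := PySem.List.pyGetD_natCast xs 3 d
theorem pvGetD4 {α : Type} (xs : List α) (d : α) : PySem.List.pyGetD xs (4:Int) d = xs.getD 4 d := PySem.List.pyGetD_natCast xs 4 d
theorem pvGetD5 {α : Type} (xs : List α) (d : α) : PySem.List.pyGetD xs (5:Int) d = xs.getD 5 d := PySem.List.pyGetD_natCast xs 5 d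
theorem pvGetD6 {α : Type} (xs : List α) (d : α) : PySem.List.pyGetD xs (6:Int) d = xs.getD 6 d := PySem.List.pyGetD_natCast xs 6 d
theorem pvGetD7 {α : Type} (xs : List α) (d : α) : PySem.List.pyGetD xs (7:Int) d = xs.getD 7 d := PySem.List.pyGetD_natCast xs 7 d
theorem pvToNat0 : Int.toNat (0:Int) = 0 := rfl
theorem pvToNat1 : Int.toNat (1:Int) = 1 := rfl
theorem pvToNat2 : Int.toNat (2:Int) = 2 := rfl
theorem pvToNat3 : Int.toNat (3:Int) = 3 := rfl
theorem pvToNat4 : Int.toNat (4:Int) = 4 := rfl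
theorem pvToNat5 : Int.toNat (5:Int) = 5 := rfl
theorem pvToNat6 : Int.toNat (6:Int) = 6 := rfl
theorem pvToNat7 : Int.toNat (7:Int) = 7 := rfl

theorem pvR8 : PySem.List.pyRange 0 8 1 = [0,1,2,3,4,5,6,7] := by decide
theorem pvR3 : PySem.List.pyRange 0 3 1 = [0,1,2] := by decide

theorem pvRound1 (g0 g1 g2 g3 g4 g5 g6 g7 : Int) :
    (PySem.List.pyRange 0 8 1).foldl (butterflyStep 1) [g0,g1,g2,g3,g4,g5,g6,g7]
      = [g0, (g1 + g0), g2, (g3 + g2), g4, (g5 + g4), g6, (g7 + g6)] := by rfl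
theorem pvRound2 (g0 g1 g2 g3 g4 g5 g6 g7 : Int) :
    (PySem.List.pyRange 0 8 1).foldl (butterflyStep 2) [g0,g1,g2,g3,g4,g5,g6,g7]
      = [g0, g1, (g2 + g0), (g3 + g1), g4, g5, (g6 + g4), (g7 + g5)] := by rfl
theorem pvRound4 (g0 g1 g2 g3 g4 g5 g6 g7 : Int) :
    (PySem.List.pyRange 0 8 1).foldl (butterflyStep 4) [g0,g1,g2,g3,g4,g5,g6,g7]
      = [g0, g1, g2, g3, (g4 + g0), (g5 + g1), (g6 + g2), (g7 + g3)] := by rfl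


-- A's row value at each point x equals the subset sum mod p
theorem pvRow0 (c0 c1 c2 c3 c4 c5 c6 c7 p : Int) (cr : List Int) :
    verifyARow (c0::c1::c2::c3::c4::c5::c6::c7::cr) p 0 = Int.fmod (c0) p := by
  norm_num [verifyARow, pvR8, monomial_eval, PySem.Int.mod, PySem.Int.band, List.getD,
    pvGetD0, pvGetD1, pvGetD2, pvGetD3, pvGetD4, pvGetD5, pvGetD6, pvGetD7,
    pvFmodAddLeft, pvFmodFmod, pvToNat0, pvToNat1, pvToNat2, pvToNat3, pvToNat4, pvToNat5, pvToNat6, pvToNat7]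
  try simp
  try ring_nf
theorem pvRow1 (c0 c1 c2 c3 c4 c5 c6 c7 p : Int) (cr : List Int) :
    verifyARow (c0::c1::c2::c3::c4::c5::c6::c7::cr) p 1 = Int.fmod (c0+c1) p := by
  norm_num [verifyARow, pvR8, monomial_eval, PySem.Int.mod, PySem.Int.band, List.getD,
    pvGetD0, pvGetD1, pvGetD2, pvGetD3, pvGetD4, pvGetD5, pvGetD6, pvGetD7,
    pvFmodAddLeft, pvFmodFmod, pvToNat0, pvToNat1, pvToNat2, pvToNat3, pvToNat4, pvToNat5, pvToNat6, pvToNat7]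
  try simp
  try ring_nf
theorem pvRow2 (c0 c1 c2 c3 c4 c5 c6 c7 p : Int) (cr : List Int) :
    verifyARow (c0::c1::c2::c3::c4::c5::c6::c7::cr) p 2 = Int.fmod (c0+c2) p := by
  norm_num [verifyARow, pvR8, monomial_eval, PySem.Int.mod, PySem.Int.band, List.getD,
    pvGetD0, pvGetD1, pvGetD2, pvGetD3, pvGetD4, pvGetD5, pvGetD6, pvGetD7,
    pvFmodAddLeft, pvFmodFmod, pvToNat0, pvToNat1, pvToNat2, pvToNat3, pvToNat4, pvToNat5, pvToNat6, pvToNat7]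
  try simp
  try ring_nf
theorem pvRow3 (c0 c1 c2 c3 c4 c5 c6 c7 p : Int) (cr : List Int) :
    verifyARow (c0::c1::c2::c3::c4::c5::c6::c7::cr) p 3 = Int.fmod (c0+c1+c2+c3) p := by
  norm_num [verifyARow, pvR8, monomial_eval, PySem.Int.mod, PySem.Int.band, List.getD,
    pvGetD0, pvGetD1, pvGetD2, pvGetD3, pvGetD4, pvGetD5, pvGetD6, pvGetD7,
    pvFmodAddLeft, pvFmodFmod, pvToNat0, pvToNat1, pvToNat2, pvToNat3, pvToNat4, pvToNat5, pvToNat6, pvToNat7]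
  try simp
  try ring_nf
theorem pvRow4 (c0 c1 c2 c3 c4 c5 c6 c7 p : Int) (cr : List Int) :
    verifyARow (c0::c1::c2::c3::c4::c5::c6::c7::cr) p 4 = Int.fmod (c0+c4) p := by
  norm_num [verifyARow, pvR8, monomial_eval, PySem.Int.mod, PySem.Int.band, List.getD,
    pvGetD0, pvGetD1, pvGetD2, pvGetD3, pvGetD4, pvGetD5, pvGetD6, pvGetD7,
    pvFmodAddLeft, pvFmodFmod, pvToNat0, pvToNat1, pvToNat2, pvToNat3, pvToNat4, pvToNat5, pvToNat6, pvToNat7]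
  try simp
  try ring_nf
theorem pvRow5 (c0 c1 c2 c3 c4 c5 c6 c7 p : Int) (cr : List Int) :
    verifyARow (c0::c1::c2::c3::c4::c5::c6::c7::cr) p 5 = Int.fmod (c0+c1+c4+c5) p := by
  norm_num [verifyARow, pvR8, monomial_eval, PySem.Int.mod, PySem.Int.band, List.getD,
    pvGetD0, pvGetD1, pvGetD2, pvGetD3, pvGetD4, pvGetD5, pvGetD6, pvGetD7,
    pvFmodAddLeft, pvFmodFmod, pvToNat0, pvToNat1, pvToNat2, pvToNat3, pvToNat4, pvToNat5, pvToNat6, pvToNat7]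
  try simp
  try ring_nf
theorem pvRow6 (c0 c1 c2 c3 c4 c5 c6 c7 p : Int) (cr : List Int) :
    verifyARow (c0::c1::c2::c3::c4::c5::c6::c7::cr) p 6 = Int.fmod (c0+c2+c4+c6) p := by
  norm_num [verifyARow, pvR8, monomial_eval, PySem.Int.mod, PySem.Int.band, List.getD,
    pvGetD0, pvGetD1, pvGetD2, pvGetD3, pvGetD4, pvGetD5, pvGetD6, pvGetD7,
    pvFmodAddLeft, pvFmodFmod, pvToNat0, pvToNat1, pvToNat2, pvToNat3, pvToNat4, pvToNat5, pvToNat6, pvToNat7]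
  try simp
  try ring_nf
theorem pvRow7 (c0 c1 c2 c3 c4 c5 c6 c7 p : Int) (cr : List Int) :
    verifyARow (c0::c1::c2::c3::c4::c5::c6::c7::cr) p 7 = Int.fmod (c0+c1+c2+c3+c4+c5+c6+c7) p := by
  norm_num [verifyARow, pvR8, monomial_eval, PySem.Int.mod, PySem.Int.band, List.getD,
    pvGetD0, pvGetD1, pvGetD2, pvGetD3, pvGetD4, pvGetD5, pvGetD6, pvGetD7,
    pvFmodAddLeft, pvFmodFmod, pvToNat0, pvToNat1, pvToNat2, pvToNat3, pvToNat4, pvToNat5, pvToNat6, pvToNat7]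
  try simp
  try ring_nf

-- ===== VERDICT (by name: the statement is the Claim_ definition above) =====
set_option maxHeartbeats 1000000 in
theorem verify_anf_spec : Claim_equal_verify_anf := by
  intro coeffs f p _ hpre
  obtain ⟨hc, hp⟩ := hpre
  unfold Spec_verify_anf
  rcases coeffs with _ | ⟨c0, _ | ⟨c1, _ | ⟨c2, _ | ⟨c3, _ | ⟨c4, _ | ⟨c5, _ | ⟨c6, _ | ⟨c7, cr⟩⟩⟩⟩⟩⟩⟩⟩ <;>
    try (exfalso; simp at hc; done)
  have hB : verify_anf_alt (c0::c1::c2::c3::c4::c5::c6::c7::cr) f p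
      = verifyBCheck [c0, (c1 + c0), (c2 + c0), ((c3 + c2) + (c1 + c0)), (c4 + c0), ((c5 + c4) + (c1 + c0)), ((c6 + c4) + (c2 + c0)), (((c7 + c6) + (c5 + c4)) + ((c3 + c2) + (c1 + c0)))] f p [0,1,2,3,4,5,6,7] := by
    unfold verify_anf_alt
    rw [pvR3]
    simp only [List.foldl]
    rw [show (1:Int) <<< (↑(Int.toNat (0:Int)) : Int) = 1 from by decide,
        show (1:Int) <<< (↑(Int.toNat (1:Int)) : Int) = 2 from by decide,
        show (1:Int) <<< (↑(Int.toNat (2:Int)) : Int) = 4 from by decide,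
        show (PySem.List.pyRange 0 8 1).map (fun i => PySem.List.pyGetD (c0::c1::c2::c3::c4::c5::c6::c7::cr) i 0) = [c0,c1,c2,c3,c4,c5,c6,c7] from by rw [pvR8]; simp [List.getD, pvGetD0, pvGetD1, pvGetD2, pvGetD3, pvGetD4, pvGetD5, pvGetD6, pvGetD7]]
    rw [pvRound1, pvRound2, pvRound4, pvR8]
  rw [hB]
  unfold verify_anf
  rw [pvR8]
  simp only [verifyALoop, verifyBCheck, PySem.Int.mod, List.getD,
    pvGetD0, pvGetD1, pvGetD2, pvGetD3, pvGetD4, pvGetD5, pvGetD6, pvGetD7,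
    pvRow0, pvRow1, pvRow2, pvRow3, pvRow4, pvRow5, pvRow6, pvRow7,
    List.getElem?_cons_zero, List.getElem?_cons_succ, Option.getD_some]
  have e1 : Int.fmod (c1 + c0) p = Int.fmod (c0 + c1) p := pvFmodCongr _ _ _ (by ring)
  have e2 : Int.fmod (c2 + c0) p = Int.fmod (c0 + c2) p := pvFmodCongr _ _ _ (by ring)
  have e3 : Int.fmod ((c3 + c2) + (c1 + c0)) p = Int.fmod (c0 + c1 + c2 + c3) p := pvFmodCongr _ _ _ (by ring)
  have e4 : Int.fmod (c4 + c0) p = Int.fmod (c0 + c4) p := pvFmodCongr _ _ _ (by ring)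
  have e5 : Int.fmod ((c5 + c4) + (c1 + c0)) p = Int.fmod (c0 + c1 + c4 + c5) p := pvFmodCongr _ _ _ (by ring)
  have e6 : Int.fmod ((c6 + c4) + (c2 + c0)) p = Int.fmod (c0 + c2 + c4 + c6) p := pvFmodCongr _ _ _ (by ring)
  have e7 : Int.fmod (((c7 + c6) + (c5 + c4)) + ((c3 + c2) + (c1 + c0))) p = Int.fmod (c0 + c1 + c2 + c3 + c4 + c5 + c6 + c7) p := pvFmodCongr _ _ _ (by ring)
  rw [e1, e2, e3, e4, e5, e6, e7]
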